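-- pv_equiv track=rewrite | github.com/mohnishmsu962000/rfp-automation-multi-agent-system | app/agents/kb_manager/nodes/find_conflicts.py | _deduplicate_new_attributes
-- ===== SOURCE A (Python) =====
-- from typing import List, Dict
--
-- def _deduplicate_new_attributes(attributes: List[Dict]) -> List[Dict]:
--     seen = {}
--     deduplicated = []
--
--     for attr in attributes:
--         key = attr["key"].lower().strip()
--
--         if key in seen:
--             existing = seen[key]
--             if len(attr["value"]) > len(existing["value"]):
--                 seen[key] = attr
--         else:
--             seen[key] = attr
--
--     return list(seen.values())
-- ===== SOURCE B (Python) =====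
-- def _deduplicate_new_attributes(attributes):
--     groups = {}
--     for attr in attributes:
--         groups.setdefault(attr["key"].lower().strip(), []).append(attr)
--     result = []
--     for g in groups.values():
--         if len(g) == 1:
--             result.append(g[0])
--         else:
--             result.append(max(g, key=lambda a: len(a["value"])))
--     return result
-- ===== Notes on version B (the rewrite author's own statement) =====
-- stated objective: alternative
-- what changed: B buckets all attributes by normalized key into a dict of groups in one pass, then reduces each group (g[0] for singletons, else max by value length, first maximal), instead of A's running-best overwrite of a seen-dict entry.
import Mathlib
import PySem

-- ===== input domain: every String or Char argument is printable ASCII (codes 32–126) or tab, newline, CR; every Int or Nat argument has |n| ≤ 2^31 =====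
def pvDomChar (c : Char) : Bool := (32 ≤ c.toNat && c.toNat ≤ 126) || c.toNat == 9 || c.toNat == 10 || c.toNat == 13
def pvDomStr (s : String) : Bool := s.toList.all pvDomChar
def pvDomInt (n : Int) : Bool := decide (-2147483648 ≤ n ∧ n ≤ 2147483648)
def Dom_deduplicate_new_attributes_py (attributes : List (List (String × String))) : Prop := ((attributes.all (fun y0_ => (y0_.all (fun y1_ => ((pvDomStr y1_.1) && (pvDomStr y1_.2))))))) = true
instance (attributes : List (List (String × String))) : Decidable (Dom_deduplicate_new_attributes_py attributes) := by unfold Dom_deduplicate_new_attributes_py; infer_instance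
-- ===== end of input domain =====

-- B replaces A's running-best dict with a group-then-reduce decomposition (bucket all attrs by
-- normalized key in one pass, then pick per group the first longest value); objective: alternative.

-- shared helpers (the exact expressions both Pythons write): attr["key"].lower().strip() and attr["value"]
def pvNorm (attr : List (String × String)) : String :=
  PySem.Str.strip (PySem.Str.lower ((PySem.Dict.mk attr).getD "key" ""))
-- attr["value"]; Pre_ guarantees "value" is present wherever either Python reads it, so getD "" is exact there
def pvVal (attr : List (String × String)) : String :=
  (PySem.Dict.mk attr).getD "value" ""

-- ===== PORT A =====
-- A's loop body: seen[key] kept, replaced when the new value is strictly longer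
def pvStepA (seen : PySem.Dict String (List (String × String))) (attr : List (String × String)) :
    PySem.Dict String (List (String × String)) :=
  let key := pvNorm attr
  if seen.contains key then
    let existing := seen.getD key []
    if PySem.Str.len (pvVal existing) < PySem.Str.len (pvVal attr) then seen.insert key attr else seen
  else seen.insert key attr

def deduplicate_new_attributes_py (attributes : List (List (String × String))) : List (List (String × String)) :=
  (attributes.foldl pvStepA PySem.Dict.empty).values

-- ===== PORT B =====
-- groups.setdefault(key, []).append(attr) — appending to the list stored at key (default []) is Dict.modify
def pvStepB (groups : PySem.Dict String (List (List (String × String)))) (attr : List (String × String)) :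
    PySem.Dict String (List (List (String × String))) :=
  groups.modify (pvNorm attr) [] (· ++ [attr])

-- per group: g[0] for a singleton, else max(g, key=lambda a: len(a["value"])) (first maximal)
def pvChoose (g : List (List (String × String))) : List (String × String) :=
  if g.length == 1 then (PySem.List.pyGet? g 0).getD []
  else (PySem.List.max? g (fun a => PySem.Str.len (pvVal a))).getD []

def deduplicate_new_attributes_py_alt (attributes : List (List (String × String))) : List (List (String × String)) :=
  let groups := attributes.foldl pvStepB PySem.Dict.empty
  groups.values.foldl (fun result g => result ++ [pvChoose g]) []

-- ===== PRECONDITION & SPEC =====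
-- Pre_ is exactly where the Python A returns: every attr must have "key" (else attr["key"] raises
-- KeyError), and every attr whose normalized key occurs more than once must have "value" (A compares
-- values only on duplicate keys; B reads values exactly on the same groups).
def Pre_deduplicate_new_attributes_py (attributes : List (List (String × String))) : Prop :=
  ∀ a ∈ attributes, (PySem.Dict.mk a).contains "key" = true ∧
    (1 < attributes.countP (fun b => pvNorm b == pvNorm a) → (PySem.Dict.mk a).contains "value" = true)
instance (attributes : List (List (String × String))) : Decidable (Pre_deduplicate_new_attributes_py attributes) := by
  unfold Pre_deduplicate_new_attributes_py; infer_instance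

def pvWitness_deduplicate_new_attributes_py : (List (List (String × String))) :=
  [[("key", " A "), ("value", "x")], [("key", "a"), ("value", "xy")], [("key", "b")]]

def Spec_deduplicate_new_attributes_py (attributes : List (List (String × String))) (out : List (List (String × String))) : Prop := out = deduplicate_new_attributes_py_alt attributes
instance (attributes : List (List (String × String))) (out : List (List (String × String))) : Decidable (Spec_deduplicate_new_attributes_py attributes out) := by unfold Spec_deduplicate_new_attributes_py; infer_instance

-- ===== CLAIM (what is proved, stated in full; the proofs are below) =====
def Claim_equal_deduplicate_new_attributes_py : Prop := ∀ (attributes : List (List (String × String))), Dom_deduplicate_new_attributes_py attributes → Pre_deduplicate_new_attributes_py attributes → Spec_deduplicate_new_attributes_py attributes (deduplicate_new_attributes_py attributes)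

-- ===== LEMMAS AND PROOFS =====

-- A's running best over a group, in group order (first element wins ties)
def pvBestOf (g : List (List (String × String))) : List (String × String) :=
  match g with
  | [] => []
  | h :: t => t.foldl (fun b a => if PySem.Str.len (pvVal b) < PySem.Str.len (pvVal a) then a else b) h

-- max? with a key on a nonempty list IS the strict-'>'-replace running fold (first maximal)
theorem pvMax?_cons (h : List (String × String)) (t : List (List (String × String)))
    (f : List (String × String) → Int) :
    PySem.List.max? (h :: t) f = some (t.foldl (fun b a => if f b < f a then a else b) h) := by
  induction t generalizing h with
  | nil => simp [PySem.List.max?]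
  | cons y t ih =>
    have := ih (if f h < f y then y else h)
    simp only [PySem.List.max?, List.foldl_cons] at this ⊢
    rw [← this]
    by_cases c : f h < f y <;> simp [c]

theorem pvItemsA (attributes : List (List (String × String))) :
    (attributes.foldl pvStepA PySem.Dict.empty).items =
      (PySem.Set.ofList (attributes.map pvNorm)).map
        (fun k => (k, pvBestOf (attributes.filter (fun a => pvNorm a == k)))) := by
  induction attributes using List.reverseRecOn with
  | nil => rfl
  | append_singleton l x ih =>
    have hkeys : (l.foldl pvStepA PySem.Dict.empty).keys = PySem.Set.ofList (l.map pvNorm) := by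
      simp only [PySem.Dict.keys, ih, List.map_map]
      simp [Function.comp_def]
    have hnodup : (l.foldl pvStepA PySem.Dict.empty).keys.Nodup := by
      rw [hkeys]; exact PySem.Set.nodup_ofList _
    have hcont : (l.foldl pvStepA PySem.Dict.empty).contains (pvNorm x)
        = decide (pvNorm x ∈ l.map pvNorm) := by
      rw [PySem.Dict.contains_eq_decide_mem_keys, hkeys]
      simp [PySem.Set.mem_ofList]
    have hfilter : ∀ k, (l ++ [x]).filter (fun a => pvNorm a == k)
        = l.filter (fun a => pvNorm a == k) ++ (if pvNorm x = k then [x] else []) := by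
      intro k
      rw [List.filter_append]
      by_cases c : pvNorm x = k <;> simp [c]
    rw [List.foldl_append, List.foldl_cons, List.foldl_nil, List.map_append, List.map_cons,
      List.map_nil, PySem.Set.ofList_append, PySem.Set.update_cons, PySem.Set.update_nil]
    by_cases hmem : pvNorm x ∈ l.map pvNorm
    · -- duplicate key: Set.add is a no-op; the entry at pvNorm x may be replaced
      have hadd : PySem.Set.add (PySem.Set.ofList (l.map pvNorm)) (pvNorm x)
          = PySem.Set.ofList (l.map pvNorm) := by
        simp [PySem.Set.add, PySem.Set.contains, PySem.Set.mem_ofList, hmem]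
      have hgne : l.filter (fun a => pvNorm a == pvNorm x) ≠ [] := by
        obtain ⟨a, ha, hae⟩ := List.exists_of_mem_map hmem
        intro hnil
        have : a ∈ l.filter (fun a => pvNorm a == pvNorm x) := by
          simp [List.mem_filter, ha, hae]
        simp [hnil] at this
      obtain ⟨gh, gt, hg⟩ := List.exists_cons_of_ne_nil hgne
      have hgetD : (l.foldl pvStepA PySem.Dict.empty).getD (pvNorm x) []
          = pvBestOf (l.filter (fun a => pvNorm a == pvNorm x)) := by
        refine PySem.Dict.getD_of_mem_items _ ?_ hnodup []
        rw [ih]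
        exact List.mem_map_of_mem (by simp [PySem.Set.mem_ofList, hmem])
      have hbest : pvBestOf (l.filter (fun a => pvNorm a == pvNorm x) ++ [x])
          = if PySem.Str.len (pvVal (pvBestOf (l.filter (fun a => pvNorm a == pvNorm x)))) <
                PySem.Str.len (pvVal x)
            then x else pvBestOf (l.filter (fun a => pvNorm a == pvNorm x)) := by
        rw [hg]; simp [pvBestOf, List.foldl_append]
      rw [hadd]
      show (pvStepA _ x).items = _
      rw [pvStepA]
      simp only [hcont, hmem, decide_true, if_true, hgetD]
      by_cases hc : PySem.Str.len (pvVal (pvBestOf (l.filter (fun a => pvNorm a == pvNorm x)))) <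
          PySem.Str.len (pvVal x)
      · rw [if_pos hc, PySem.Dict.items_insert_of_contains _ x (by rw [hcont]; simp [hmem]), ih,
          List.map_map]
        apply List.map_congr_left
        intro k hk
        by_cases hke : k = pvNorm x
        · subst hke
          simp only [Function.comp_apply, beq_self_eq_true, if_true]
          rw [hfilter, if_pos rfl, hbest, if_pos hc]
        · have : ¬ (k == pvNorm x) = true := by simp [hke]
          simp only [Function.comp_apply, this, hfilter k]
          simp [Ne.symm hke]
      · rw [if_neg hc, ih]
        apply List.map_congr_left
        intro k hk
        by_cases hke : k = pvNorm x
        · subst hke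
          rw [hfilter, if_pos rfl, hbest, if_neg hc]
        · rw [hfilter k, if_neg (Ne.symm hke), List.append_nil]
    · -- fresh key: appended at the end on both sides
      have hadd : PySem.Set.add (PySem.Set.ofList (l.map pvNorm)) (pvNorm x)
          = PySem.Set.ofList (l.map pvNorm) ++ [pvNorm x] := by
        simp [PySem.Set.add, PySem.Set.contains, PySem.Set.mem_ofList, hmem]
      have hgempty : l.filter (fun a => pvNorm a == pvNorm x) = [] := by
        rw [List.filter_eq_nil_iff]
        intro a ha hc
        rw [beq_iff_eq] at hc
        exact hmem (hc ▸ List.mem_map_of_mem ha)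
      rw [hadd]
      show (pvStepA _ x).items = _
      rw [pvStepA]
      simp only [hcont, hmem, decide_false, Bool.false_eq_true, if_false]
      rw [PySem.Dict.items_insert_of_not_contains _ x (by rw [hcont]; simp [hmem]), ih,
        List.map_append]
      congr 1
      · apply List.map_congr_left
        intro k hk
        have hke : pvNorm x ≠ k := by
          intro he; exact hmem (by rw [he]; simpa [PySem.Set.mem_ofList] using hk)
        rw [hfilter k, if_neg hke, List.append_nil]
      · simp [hfilter, hgempty, pvBestOf]

theorem pvItemsB (attributes : List (List (String × String))) :
    (attributes.foldl pvStepB PySem.Dict.empty).items =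
      (PySem.Set.ofList (attributes.map pvNorm)).map
        (fun k => (k, attributes.filter (fun a => pvNorm a == k))) := by
  have hkeys : (attributes.foldl pvStepB PySem.Dict.empty).keys
      = PySem.Set.ofList (attributes.map pvNorm) := by
    have he : attributes.foldl pvStepB PySem.Dict.empty
        = attributes.foldl (fun d x => d.modify (pvNorm x) [] (fun v => v ++ [x])) PySem.Dict.empty := rfl
    rw [he, PySem.Dict.keys_foldl_modify_key]
    simp [PySem.Set.update_nil_left, PySem.Dict.keys_empty]
  have hnodup : (attributes.foldl pvStepB PySem.Dict.empty).keys.Nodup := by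
    rw [hkeys]; exact PySem.Set.nodup_ofList _
  have hgetD : ∀ k, (attributes.foldl pvStepB PySem.Dict.empty).getD k []
      = attributes.filter (fun a => pvNorm a == k) := by
    intro k
    have hmap : attributes.foldl pvStepB PySem.Dict.empty
        = (attributes.map (fun a => (pvNorm a, a))).foldl
            (fun d p => d.modify p.1 [] (· ++ [p.2])) PySem.Dict.empty := by
      rw [List.foldl_map]; rfl
    rw [hmap, PySem.Dict.getD_foldl_modify_append, PySem.Dict.getD_empty, List.nil_append,
      List.filter_map, List.map_map]
    simp [Function.comp_def]
  rw [PySem.Dict.items_eq_map_keys _ hnodup [], hkeys]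
  apply List.map_congr_left
  intro k hk
  rw [hgetD k]

theorem pvChoose_eq_bestOf (g : List (List (String × String))) (hne : g ≠ []) :
    pvChoose g = pvBestOf g := by
  obtain ⟨h, t, rfl⟩ := List.exists_cons_of_ne_nil hne
  cases t with
  | nil => simp [pvChoose, pvBestOf, PySem.List.pyGet?, PySem.List.pyIdx?]
  | cons y t =>
    rw [pvChoose, if_neg (by simp), pvMax?_cons]
    simp [pvBestOf]

-- ===== VERDICT (by name: the statement is the Claim_ definition above) =====
theorem deduplicate_new_attributes_py_spec : Claim_equal_deduplicate_new_attributes_py := by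
  intro attributes _ _
  show deduplicate_new_attributes_py attributes = deduplicate_new_attributes_py_alt attributes
  rw [deduplicate_new_attributes_py, deduplicate_new_attributes_py_alt]
  rw [PySem.List.foldl_append_singleton_eq_map]
  simp only [PySem.Dict.values, pvItemsA, pvItemsB, List.map_map, List.nil_append]
  apply List.map_congr_left
  intro k hk
  have hne : attributes.filter (fun a => pvNorm a == k) ≠ [] := by
    rw [PySem.Set.mem_ofList] at hk
    obtain ⟨a, ha, hae⟩ := List.exists_of_mem_map hk
    intro hnil
    have : a ∈ attributes.filter (fun a => pvNorm a == k) := by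
      simp [List.mem_filter, ha, hae]
    simp [hnil] at this
  simp [Function.comp_apply, pvChoose_eq_bestOf _ hne]
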